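-- pv_equiv track=rewrite | github.com/kanujoa/coding_test_practice | python_programmers_school/level 1/숫자 짝궁.py | solution
-- ===== SOURCE A (Python) =====
-- from collections import Counter     # Counter 안쓰고 그냥 count 사용해도 됨.
--
-- def solution(X, Y):
--     answer = ''
--     X = Counter(X)
--     Y = Counter(Y)
--
--     for i in range(9, -1, -1):     # i의 범위를 9부터 -1까지 -1 간격으로 설정
--         answer += (str(i) * min(X[str(i)], Y[str(i)]))      # X 에서의 str(i)의 개수와 Y에서의 str(i)의 개수 중 더 작은 수만큼 str(i)를 answer에 더한다.
--
--     if answer == '':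
--         return '-1'
--     elif len(answer) == Counter(answer)['0']:
--         return '0'
--     else:
--         return answer
-- ===== SOURCE B (Python) =====
-- def solution(X, Y):
--     xs = sorted((c for c in X if '0' <= c <= '9'), reverse=True)
--     ys = sorted((c for c in Y if '0' <= c <= '9'), reverse=True)
--     out = []
--     i = j = 0
--     while i < len(xs) and j < len(ys):
--         if xs[i] == ys[j]:
--             out.append(xs[i])
--             i += 1
--             j += 1
--         elif xs[i] > ys[j]:
--             i += 1
--         else:
--             j += 1
--     if not out:
--         return '-1'
--     if out[0] == '0':
--         return '0'
--     return ''.join(out)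
-- ===== Notes on version B (the rewrite author's own statement) =====
-- stated objective: alternative
-- what changed: Replaces the fixed 9..0 Counter-lookup loop by filtering each string to its digit characters, sorting both descending, and computing the common multiset with a two-pointer sorted-merge intersection; the all-zeros test becomes a check of the first (largest) character.
import Mathlib
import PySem

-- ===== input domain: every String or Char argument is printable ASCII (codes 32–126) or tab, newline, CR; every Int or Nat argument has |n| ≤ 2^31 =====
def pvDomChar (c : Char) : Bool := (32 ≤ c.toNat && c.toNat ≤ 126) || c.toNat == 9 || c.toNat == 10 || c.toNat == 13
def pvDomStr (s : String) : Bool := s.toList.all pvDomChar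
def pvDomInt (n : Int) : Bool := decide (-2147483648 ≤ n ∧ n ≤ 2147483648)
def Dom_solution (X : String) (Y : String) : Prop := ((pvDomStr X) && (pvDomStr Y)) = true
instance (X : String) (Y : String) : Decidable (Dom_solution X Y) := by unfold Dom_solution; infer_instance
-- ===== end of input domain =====

-- B replaces A's fixed 9..0 Counter-lookup loop by sorting each string's digit characters
-- descending and intersecting them with a two-pointer merge (objective: alternative).

-- ===== PORT A =====
-- str(i) as its list of characters (on the loop's range 0 ≤ i ≤ 9 this is the one digit character)
def pyDigitChars (i : Int) : List Char := (PySem.Int.toStr i).toList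

def solution (X : String) (Y : String) : String :=
  let xc := PySem.Dict.counter X.toList   -- X = Counter(X)
  let yc := PySem.Dict.counter Y.toList   -- Y = Counter(Y)
  -- answer accumulated as its list of characters; 'str(i) * n' is n copies of str(i) concatenated;
  -- the Counter key str(i) is its single character (headD is exact on the loop's range 9..0)
  let answer := (PySem.List.pyRange 9 (-1) (-1)).foldl
    (fun acc i =>
      let d := pyDigitChars i
      let n := min (xc.getD (d.headD ' ') 0) (yc.getD (d.headD ' ') 0)
      acc ++ (List.replicate n.toNat d).flatten) []
  if answer = [] then "-1"
  else if (answer.length : Int) = (PySem.Dict.counter answer).getD '0' 0 then "0"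
  else String.ofList answer

-- ===== PORT B =====
-- the while loop over indices i, j: each step drops the larger head, or keeps and drops both when equal
def mergeCommon : List Char → List Char → List Char
  | x :: xs, y :: ys =>
    if x = y then x :: mergeCommon xs ys
    else if x > y then mergeCommon xs (y :: ys)
    else mergeCommon (x :: xs) ys
  | _, _ => []
termination_by xs ys => xs.length + ys.length
decreasing_by all_goals first | (simp; omega) | simp

def solution_alt (X : String) (Y : String) : String :=
  let xs := PySem.List.sorted (X.toList.filter (fun c => decide ('0' ≤ c) && decide (c ≤ '9'))) (fun c => c) true
  let ys := PySem.List.sorted (Y.toList.filter (fun c => decide ('0' ≤ c) && decide (c ≤ '9'))) (fun c => c) true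
  let out := mergeCommon xs ys
  match out with
  | [] => "-1"
  | c :: _ => if c = '0' then "0" else String.ofList out

-- ===== PRECONDITION & SPEC =====
def Spec_solution (X : String) (Y : String) (out : String) : Prop := out = solution_alt X Y
instance (X : String) (Y : String) (out : String) : Decidable (Spec_solution X Y out) := by unfold Spec_solution; infer_instance

-- ===== CLAIM (what is proved, stated in full; the proofs are below) =====
def Claim_equal_solution : Prop := ∀ (X : String) (Y : String), Dom_solution X Y → Spec_solution X Y (solution X Y)

-- ===== LEMMAS AND PROOFS =====

def dch (d : Nat) : Char := Char.ofNat (48 + d)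
def digitsDesc : List Nat := [9, 8, 7, 6, 5, 4, 3, 2, 1, 0]
def build (m : Nat → Nat) : List Char := digitsDesc.flatMap (fun d => List.replicate (m d) (dch d))
def isDig (c : Char) : Bool := decide ('0' ≤ c) && decide (c ≤ '9')

theorem count_build_nondig (m : Nat → Nat) (c : Char) (h : isDig c = false) :
    (build m).count c = 0 := by
  simp [isDig] at h
  simp [build, digitsDesc, List.count_append, List.count_replicate]
  and_intros <;> (rintro rfl; exact absurd (h (by decide)) (by decide))

theorem mem_build_dig (m : Nat → Nat) (c : Char) (h : c ∈ build m) : isDig c = true := by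
  by_contra hc
  have := count_build_nondig m c (by simpa using hc)
  exact absurd (List.count_pos_iff.mpr h) (by omega)

theorem build_pairwise (m : Nat → Nat) : (build m).Pairwise (· ≥ ·) := by
  rw [build, List.pairwise_flatMap]
  constructor
  · intro a _; exact List.pairwise_replicate.mpr (Or.inr (le_refl _))
  · refine List.Pairwise.imp ?_ (show digitsDesc.Pairwise (fun a b => dch b ≤ dch a) by decide)
    intro a b hab x hx y hy
    simp [List.eq_of_mem_replicate hx, List.eq_of_mem_replicate hy]
    exact hab

theorem count_build_dch (m : Nat → Nat) (d : Nat) (h : d < 10) :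
    (build m).count (dch d) = m d := by
  interval_cases d <;>
    simp [build, digitsDesc, List.count_append, List.count_replicate, dch]

theorem dch_eq_self (c : Char) (h : isDig c = true) : dch (c.toNat - 48) = c ∧ c.toNat - 48 < 10 := by
  simp [isDig] at h
  have h1 : 48 ≤ c.toNat := h.1
  have h2 : c.toNat ≤ 57 := h.2
  constructor
  · rw [dch, show 48 + (c.toNat - 48) = c.toNat by omega, Char.ofNat_toNat]
  · omega


theorem dig_dch (d : Nat) (h : d < 10) : isDig (dch d) = true := by
  interval_cases d <;> decide

theorem build_congr (a b : Nat → Nat) (h : ∀ d, d < 10 → a d = b d) : build a = build b := by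
  simp only [build, digitsDesc, List.flatMap_cons, List.flatMap_nil]
  rw [h 9 (by omega), h 8 (by omega), h 7 (by omega), h 6 (by omega), h 5 (by omega),
      h 4 (by omega), h 3 (by omega), h 2 (by omega), h 1 (by omega), h 0 (by omega)]

theorem desc_eq_build (l : List Char) (hd : ∀ c ∈ l, isDig c = true)
    (hp : l.Pairwise (· ≥ ·)) : l = build (fun d => l.count (dch d)) := by
  have hperm : l.Perm (build (fun d => l.count (dch d))) := by
    rw [List.perm_iff_count]
    intro c
    by_cases hc : isDig c = true
    · obtain ⟨he, hlt⟩ := dch_eq_self c hc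
      conv_rhs => rw [← he]
      rw [count_build_dch _ _ hlt, he]
    · rw [count_build_nondig _ _ (by simpa using hc)]
      exact List.count_eq_zero.mpr (fun hm => hc (hd c hm))
  exact hperm.eq_of_pairwise (fun a b _ _ h h' => le_antisymm h' h) hp (build_pairwise _)

theorem sorted_filter_eq_build (L : List Char) :
    PySem.List.sorted (L.filter (fun c => decide ('0' ≤ c) && decide (c ≤ '9'))) (fun c => c) true
      = build (fun d => L.count (dch d)) := by
  have hd : ∀ c ∈ PySem.List.sorted (L.filter (fun c => decide ('0' ≤ c) && decide (c ≤ '9'))) (fun c => c) true, isDig c = true := by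
    intro c hc
    rw [PySem.List.mem_sorted] at hc
    simpa [isDig] using (List.mem_filter.mp hc).2
  have hp : (PySem.List.sorted (L.filter (fun c => decide ('0' ≤ c) && decide (c ≤ '9'))) (fun c => c) true).Pairwise (· ≥ ·) := by
    have := PySem.List.sorted_pairwise_rev (L.filter (fun c => decide ('0' ≤ c) && decide (c ≤ '9'))) (fun c => c)
    exact this.imp (fun h => h)
  rw [desc_eq_build _ hd hp]
  apply build_congr
  intro d hlt
  have hperm := PySem.List.sorted_perm (L.filter (fun c => decide ('0' ≤ c) && decide (c ≤ '9'))) (fun c => c) true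
  rw [hperm.count_eq, List.count_filter]
  simp [show (decide ('0' ≤ dch d) && decide (dch d ≤ '9')) = true from dig_dch d hlt]


theorem mergeCommon_sublist (xs ys : List Char) : (mergeCommon xs ys).Sublist xs := by
  induction xs, ys using mergeCommon.induct with
  | case1 xs y ys ih => rw [mergeCommon, if_pos rfl]; exact ih.cons₂ y
  | case2 x xs y ys hne hgt ih => rw [mergeCommon, if_neg hne, if_pos hgt]; exact ih.cons x
  | case3 x xs y ys hne hngt ih => rw [mergeCommon, if_neg hne, if_neg hngt]; exact ih
  | case4 xs ys h =>
      rcases xs with _ | ⟨x, xs⟩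
      · rw [mergeCommon]
        simp
      · rcases ys with _ | ⟨y, ys⟩
        · rw [mergeCommon]
          · exact List.nil_sublist _
          · simp
        · exact absurd (h x xs y ys rfl rfl) (fun f => f)

theorem mergeCommon_count (xs ys : List Char) (hx : xs.Pairwise (· ≥ ·))
    (hy : ys.Pairwise (· ≥ ·)) (c : Char) :
    (mergeCommon xs ys).count c = min (xs.count c) (ys.count c) := by
  induction xs, ys using mergeCommon.induct with
  | case1 xs y ys ih =>
      rw [mergeCommon, if_pos rfl, List.count_cons, List.count_cons, List.count_cons,
        ih (List.Pairwise.of_cons hx) (List.Pairwise.of_cons hy)]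
      by_cases hc : y = c <;> simp [hc]
  | case2 x xs y ys hne hgt ih =>
      rw [mergeCommon, if_neg hne, if_pos hgt, ih (List.Pairwise.of_cons hx) hy]
      by_cases hc : c = x
      · subst hc
        have h0 : (y :: ys).count c = 0 := by
          rw [List.count_eq_zero]
          intro hm
          have hxy : c ≤ y := by
            rcases List.mem_cons.mp hm with h' | h'
            · exact le_of_eq h'
            · exact List.rel_of_pairwise_cons hy h'
          exact absurd hgt (not_lt.mpr hxy)
        rw [h0]
        simp
      · rw [List.count_cons_of_ne (Ne.symm hc)]
  | case3 x xs y ys hne hngt ih =>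
      rw [mergeCommon, if_neg hne, if_neg hngt, ih hx (List.Pairwise.of_cons hy)]
      by_cases hc : c = y
      · subst hc
        have hlt : x < c := lt_of_le_of_ne (not_lt.mp hngt) hne
        have h0 : (x :: xs).count c = 0 := by
          rw [List.count_eq_zero]
          intro hm
          have hcx : c ≤ x := by
            rcases List.mem_cons.mp hm with h' | h'
            · exact le_of_eq h'
            · exact List.rel_of_pairwise_cons hx h'
          exact absurd hlt (not_lt.mpr hcx)
        rw [h0]
        simp
      · rw [List.count_cons_of_ne (Ne.symm hc)]
  | case4 xs ys h =>
      rcases xs with _ | ⟨x, xs⟩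
      · rw [mergeCommon]
        · simp
        · simp
      · rcases ys with _ | ⟨y, ys⟩
        · rw [mergeCommon]
          · simp
          · simp
        · exact absurd (h x xs y ys rfl rfl) (fun f => f)

theorem mergeCommon_build (a b : Nat → Nat) :
    mergeCommon (build a) (build b) = build (fun d => min (a d) (b d)) := by
  have hsub := mergeCommon_sublist (build a) (build b)
  have hpw : (mergeCommon (build a) (build b)).Pairwise (· ≥ ·) :=
    (build_pairwise a).sublist hsub
  have hdig : ∀ c ∈ mergeCommon (build a) (build b), isDig c = true :=
    fun c hc => mem_build_dig a c (hsub.mem hc)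
  rw [desc_eq_build _ hdig hpw]
  apply build_congr
  intro d hd
  rw [mergeCommon_count _ _ (build_pairwise a) (build_pairwise b),
    count_build_dch _ _ hd, count_build_dch _ _ hd]

theorem min_int_toNat (a b : Nat) : (min (a : Int) (b : Int)).toNat = min a b := by omega

theorem flatten_replicate_singleton (n : Nat) (c : Char) :
    (List.replicate n [c]).flatten = List.replicate n c := by
  induction n with
  | zero => rfl
  | succ k ih => simp [List.replicate_succ, ih]

theorem answerA_eq_build (X Y : String) :
    (PySem.List.pyRange 9 (-1) (-1)).foldl
      (fun acc i =>
        let d := pyDigitChars i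
        let n := min ((PySem.Dict.counter X.toList).getD (d.headD ' ') 0)
                     ((PySem.Dict.counter Y.toList).getD (d.headD ' ') 0)
        acc ++ (List.replicate n.toNat d).flatten) []
    = build (fun d => min (X.toList.count (dch d)) (Y.toList.count (dch d))) := by
  have hr : PySem.List.pyRange 9 (-1) (-1) = [9, 8, 7, 6, 5, 4, 3, 2, 1, 0] := by decide
  rw [hr]
  simp only [List.foldl_cons, List.foldl_nil, List.nil_append]
  simp only [show pyDigitChars 9 = [dch 9] from by decide, show pyDigitChars 8 = [dch 8] from by decide,
    show pyDigitChars 7 = [dch 7] from by decide, show pyDigitChars 6 = [dch 6] from by decide,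
    show pyDigitChars 5 = [dch 5] from by decide, show pyDigitChars 4 = [dch 4] from by decide,
    show pyDigitChars 3 = [dch 3] from by decide, show pyDigitChars 2 = [dch 2] from by decide,
    show pyDigitChars 1 = [dch 1] from by decide, show pyDigitChars 0 = [dch 0] from by decide,
    List.headD_cons, flatten_replicate_singleton, PySem.Dict.getD_counter, min_int_toNat]
  simp [build, digitsDesc, List.append_assoc]

theorem tail_cond (m : Nat → Nat) (c : Char) (t : List Char) (h : build m = c :: t) :
    ((((build m).length : Int) = (PySem.Dict.counter (build m)).getD '0' 0) ↔ c = '0') := by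
  rw [PySem.Dict.getD_counter]
  have hiff : ((((build m).length : Int) = ((build m).count '0' : Int)) ↔ ∀ b ∈ build m, '0' = b) := by
    rw [show (((build m).length : Int) = ((build m).count '0' : Int)) ↔ (build m).count '0' = (build m).length by omega]
    exact List.count_eq_length
  rw [hiff]
  constructor
  · intro hall
    exact (hall c (h ▸ List.mem_cons_self)).symm
  · intro hc b hb
    have hle : b ≤ c := by
      rw [h] at hb
      rcases List.mem_cons.mp hb with rfl | hb'
      · exact le_refl _
      · have hpw : (c :: t).Pairwise (fun a b => a ≥ b) := h ▸ build_pairwise m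
        exact List.rel_of_pairwise_cons hpw hb'
    have hge : '0' ≤ b := by
      have := mem_build_dig m b hb
      simp [isDig] at this
      exact this.1
    subst hc
    exact le_antisymm hge hle


-- ===== VERDICT (by name: the statement is the Claim_ definition above) =====
theorem solution_spec : Claim_equal_solution := by
  intro X Y _
  unfold Spec_solution solution solution_alt
  simp only [answerA_eq_build, sorted_filter_eq_build, mergeCommon_build]
  rcases hE : build (fun d => min (X.toList.count (dch d)) (Y.toList.count (dch d))) with _ | ⟨c, t⟩
  · simp
  · have htc := tail_cond _ _ _ hE
    rw [hE] at htc
    rw [if_neg (by simp)]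
    rcases eq_or_ne c '0' with rfl | hc
    · rw [if_pos (htc.mpr rfl)]; simp
    · rw [if_neg (fun hcond => hc (htc.mp hcond))]; simp [hc]
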